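/- GENERATED by c/gen_decode.py: decode facts of the image, one per distinct instruction byte string. -/
import UserX.DecodeImage

#decode_all Gif.Dec
  "0f0b"  -- ud2
  "0f843cfdffff"  -- je 106cfb
  "0f848dfcffff"  -- je 106c3f
  "0f84bc000000"  -- je 107fa5
  "0f854cffffff"  -- jne 106f75
  "0f8d3afdffff"  -- jge 106d06
  "0f8f9d010000"  -- jg 10a914
  "0f9cc2"  -- setl dl
  "0fb633"  -- movzx esi,BYTE PTR [rbx]
  "0fb66c2420"  -- movzx ebp,BYTE PTR [rsp+0x20]
  "396b2c"  -- cmp DWORD PTR [rbx+0x2c],ebp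
  "3c2c"  -- cmp al,0x2c
  "4038d5"  -- cmp bpl,dl
  "410fb6d7"  -- movzx edx,r15b
  "4183c401"  -- add r12d,0x1
  "4183e508"  -- and r13d,0x8
  "41892c24"  -- mov DWORD PTR [r12],ebp
  "41896c2418"  -- mov DWORD PTR [r12+0x18],ebp
  "418b0424"  -- mov eax,DWORD PTR [r12]
  "418b4610"  -- mov eax,DWORD PTR [r14+0x10]
  "418b742408"  -- mov esi,DWORD PTR [r12+0x8]
  "41bd00000000"  -- mov r13d,0x0
  "41c6465800"  -- mov BYTE PTR [r14+0x58],0x0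
  "41c7450003000000"  -- mov DWORD PTR [r13+0x0],0x3
  "41c7462002100000"  -- mov DWORD PTR [r14+0x20],0x1002
  "41c7850000c000f1f1f1f1"  -- mov DWORD PTR [r13+0xc00000],0xf1f1f1f1
  "44032c9d00131400"  -- add r13d,DWORD PTR [rbx*4+0x141300]
  "440fb67c2421"  -- movzx r15d,BYTE PTR [rsp+0x21]
  "448823"  -- mov BYTE PTR [rbx],r12b
  "44897308"  -- mov DWORD PTR [rbx+0x8],r14d
  "4489e1"  -- mov ecx,r12d
  "4489ee"  -- mov esi,r13d
  "448b23"  -- mov r12d,DWORD PTR [rbx]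
  "448b7500"  -- mov r14d,DWORD PTR [rbp+0x0]
  "448d7301"  -- lea r14d,[rbx+0x1]
  "4539fc"  -- cmp r12d,r15d
  "45883e"  -- mov BYTE PTR [r14],r15b
  "45896614"  -- mov DWORD PTR [r14+0x14],r12d
  "458b6500"  -- mov r12d,DWORD PTR [r13+0x0]
  "480fafc2"  -- imul rax,rdx
  "4839ca"  -- cmp rdx,rcx
  "4863d5"  -- movsxd rdx,ebp
  "4881ec88000000"  -- sub rsp,0x88
  "4883c440"  -- add rsp,0x40
  "4883ec48"  -- sub rsp,0x48
  "4889442408"  -- mov QWORD PTR [rsp+0x8],rax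
  "4889742430"  -- mov QWORD PTR [rsp+0x30],rsi
  "4889e5"  -- mov rbp,rsp
  "488b442430"  -- mov rax,QWORD PTR [rsp+0x30]
  "488b5d70"  -- mov rbx,QWORD PTR [rbp+0x70]
  "488b7500"  -- mov rsi,QWORD PTR [rbp+0x0]
  "488b7b70"  -- mov rdi,QWORD PTR [rbx+0x70]
  "488d1cc500000000"  -- lea rbx,[rax*8+0x0]
  "488d542440"  -- lea rdx,[rsp+0x40]
  "488d7328"  -- lea rsi,[rbx+0x28]
  "488d742470"  -- lea rsi,[rsp+0x70]
  "488d7b10"  -- lea rdi,[rbx+0x10]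
  "488d7b30"  -- lea rdi,[rbx+0x30]
  "488d7b70"  -- lea rdi,[rbx+0x70]
  "488d7d30"  -- lea rdi,[rbp+0x30]
  "488d7f48"  -- lea rdi,[rdi+0x48]
  "48bf25232284e49cf2cb"  -- movabs rdi,0xcbf29ce484222325
  "48c7433000000000"  -- mov QWORD PTR [rbx+0x30],0x0
  "48c744240860141400"  -- mov QWORD PTR [rsp+0x8],0x141460
  "48c744241000501000"  -- mov QWORD PTR [rsp+0x10],0x105000
  "48c744241080ad1000"  -- mov QWORD PTR [rsp+0x10],0x10ad80
  "48c744242020981000"  -- mov QWORD PTR [rsp+0x20],0x109820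
  "48c7454000000000"  -- mov QWORD PTR [rbp+0x40],0x0
  "49034610"  -- add rax,QWORD PTR [r14+0x10]
  "4963c5"  -- movsxd rax,r13d
  "4981c458210000"  -- add r12,0x2158
  "4989c5"  -- mov r13,rax
  "4989f4"  -- mov r12,rsi
  "498b7500"  -- mov rsi,QWORD PTR [r13+0x0]
  "498d5cad00"  -- lea rbx,[r13+rbp*4+0x0]
  "498d7c241c"  -- lea rdi,[r12+0x1c]
  "498d7c2450"  -- lea rdi,[r12+0x50]
  "498d7e08"  -- lea rdi,[r14+0x8]
  "498d7e38"  -- lea rdi,[r14+0x38]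
  "49c1ee03"  -- shr r14,0x3
  "49d3e4"  -- shl r12,cl
  "4c29ed"  -- sub rbp,r13
  "4c896c2440"  -- mov QWORD PTR [rsp+0x40],r13
  "4c89ef"  -- mov rdi,r13
  "4c8b6318"  -- mov r12,QWORD PTR [rbx+0x18]
  "4c8b6c2440"  -- mov r13,QWORD PTR [rsp+0x40]
  "4c8b7b40"  -- mov r15,QWORD PTR [rbx+0x40]
  "4c8d6301"  -- lea r12,[rbx+0x1]
  "4d036f10"  -- add r13,QWORD PTR [r15+0x10]
  "4d89c5"  -- mov r13,r8
  "7027"  -- jo 1077b2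
  "740d"  -- je 10a531
  "7429"  -- je 1060a0
  "743f"  -- je 108c8e
  "745e"  -- je 10a2ab
  "7491"  -- je 10a28e
  "750c"  -- jne 106bc5
  "752a"  -- jne 1077ba
  "75b5"  -- jne 10a8a2
  "7d05"  -- jge 10787a
  "7ec1"  -- jle 10a93c
  "7f33"  -- jg 10691f
  "81fbfe0f0000"  -- cmp ebx,0xffe
  "83c302"  -- add ebx,0x2
  "83f803"  -- cmp eax,0x3
  "8803"  -- mov BYTE PTR [rbx],al
  "89442410"  -- mov DWORD PTR [rsp+0x10],eax
  "896b14"  -- mov DWORD PTR [rbx+0x14],ebp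
  "89d3"  -- mov ebx,edx
  "89e9"  -- mov ecx,ebp
  "8b4320"  -- mov eax,DWORD PTR [rbx+0x20]
  "8b4500"  -- mov eax,DWORD PTR [rbp+0x0]
  "8b6c2430"  -- mov ebp,DWORD PTR [rsp+0x30]
  "8d4501"  -- lea eax,[rbp+0x1]
  "b8ffffff7f"  -- mov eax,0x7fffffff
  "ba68610000"  -- mov edx,0x6168
  "beffffffff"  -- mov esi,0xffffffff
  "c1ee08"  -- shr esi,0x8
  "c7053cab03000c000000"  -- mov DWORD PTR [rip+0x3ab3c],0xc
  "c7432000000000"  -- mov DWORD PTR [rbx+0x20],0x0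
  "c744241402100000"  -- mov DWORD PTR [rsp+0x14],0x1002
  "c7455000000000"  -- mov DWORD PTR [rbp+0x50],0x0
  "c7830000c00000000000"  -- mov DWORD PTR [rbx+0xc00000],0x0
  "d3e0"  -- shl eax,cl
  "e80284ffff"  -- call 100720
  "e80770ffff"  -- call 1008e0
  "e80bb6ffff"  -- call 103200
  "e80fe1ffff"  -- call 105160
  "e81357ffff"  -- call 100720
  "e81759ffff"  -- call 100720
  "e81d65ffff"  -- call 100800
  "e82287ffff"  -- call 1008e0
  "e825faffff"  -- call 1053a0
  "e8295d0000"  -- call 10ad80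
  "e82d6dffff"  -- call 100800
  "e83086ffff"  -- call 100720
  "e8327bffff"  -- call 100720
  "e8349effff"  -- call 1003c0
  "e83796ffff"  -- call 1003c0
  "e83effffff"  -- call 105240
  "e84273ffff"  -- call 100800
  "e84561ffff"  -- call 100640
  "e8479affff"  -- call 100720
  "e849fcffff"  -- call 109f40
  "e84ffaffff"  -- call 1052e0
  "e85398ffff"  -- call 100720
  "e858ffffff"  -- call 105240
  "e85e9dffff"  -- call 100640
  "e864a4ffff"  -- call 100720
  "e867fcffff"  -- call 1052e0
  "e86b68ffff"  -- call 100800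
  "e86eafffff"  -- call 103800
  "e87385ffff"  -- call 100800
  "e878abffff"  -- call 100800
  "e87e6bffff"  -- call 100800
  "e884afffff"  -- call 100640
  "e88a5cffff"  -- call 100640
  "e88b95ffff"  -- call 1003c0
  "e89299ffff"  -- call 100640
  "e898f9ffff"  -- call 1052e0
  "e89cafffff"  -- call 100800
  "e8a4d2ffff"  -- call 107b40
  "e8a78cffff"  -- call 1008e0
  "e8acd7ffff"  -- call 108680
  "e8aefeffff"  -- call 105f20
  "e8b188ffff"  -- call 100800
  "e8b5fcffff"  -- call 1053a0
  "e8b8ecffff"  -- call 109c60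
  "e8bbf9ffff"  -- call 1052e0
  "e8bfa4ffff"  -- call 100720
  "e8c5a8ffff"  -- call 100800
  "e8c87effff"  -- call 100720
  "e8cd6bffff"  -- call 100720
  "e8d1a4ffff"  -- call 100720
  "e8d7adffff"  -- call 103500
  "e8dc76ffff"  -- call 100640
  "e8df8cffff"  -- call 1008e0
  "e8e286ffff"  -- call 1008e0
  "e8e89cffff"  -- call 100300
  "e8ec6fffff"  -- call 1008e0
  "e8f156ffff"  -- call 100720
  "e8f79dffff"  -- call 100640
  "e8fb97ffff"  -- call 100640
  "e91cffffff"  -- jmp 108816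
  "e93e030000"  -- jmp 106f7d
  "e95fffffff"  -- jmp 1098a6
  "e97cffffff"  -- jmp 108bf5
  "e9adfeffff"  -- jmp 108e78
  "e9e6feffff"  -- jmp 1080f7
  "eb40"  -- jmp 105de9
  "eb84"  -- jmp 10a28e
  "ebb1"  -- jmp 10a8ed
  "ebca"  -- jmp 10608c
  "ebeb"  -- jmp 107865
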